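-- pv_equiv track=rewrite | github.com/kk97111/SequentialEnsemble | basemodel/GCNdata.py | find_latest_interaction
-- ===== SOURCE A (Python) =====
-- import copy
--
-- last = 5# 5for BMS;10for SNR
--
-- def find_latest_interaction(u_i,keep = last):
--     result = dict()
--     init = [-1 for i in range(keep)]
--     latest = copy.deepcopy(init)
--     for i,user_item in enumerate(u_i):
--         user,item = user_item
--         result[(user,item)] =  copy.deepcopy(list(latest[-keep:]))
--         if i<len(u_i)-1:
--             if u_i[i+1][0] != user:
--                 latest = copy.deepcopy(init)
--             else:
--                 latest.append(item)
--
--     return result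
-- ===== SOURCE B (Python) =====
-- def find_latest_interaction(u_i, keep=5):
--     # phase 1: split u_i into maximal runs of consecutive equal user
--     runs = []
--     n = len(u_i)
--     i = 0
--     while i < n:
--         j = i + 1
--         while j < n and u_i[j][0] == u_i[i][0]:
--             j += 1
--         runs.append(u_i[i:j])
--         i = j
--     # phase 2: per-run windowing via slicing, no running buffer
--     result = {}
--     for run in runs:
--         items = [item for _, item in run]
--         for j, (user, item) in enumerate(run):
--             prior = items[:j]
--             if len(prior) < keep:
--                 result[(user, item)] = [-1] * (keep - len(prior)) + prior
--             else:
--                 result[(user, item)] = prior[-keep:]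
--     return result
-- ===== Notes on version B (the rewrite author's own statement) =====
-- stated objective: alternative
-- what changed: Replaced A's single accumulate-and-copy pass with a running buffer by a two-phase algorithm: first split u_i into maximal runs of consecutive equal users, then compute each window directly by slicing the run's item prefix (explicit [-1] left-padding), with no mutable 'latest' buffer or deep copies.
import Mathlib
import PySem

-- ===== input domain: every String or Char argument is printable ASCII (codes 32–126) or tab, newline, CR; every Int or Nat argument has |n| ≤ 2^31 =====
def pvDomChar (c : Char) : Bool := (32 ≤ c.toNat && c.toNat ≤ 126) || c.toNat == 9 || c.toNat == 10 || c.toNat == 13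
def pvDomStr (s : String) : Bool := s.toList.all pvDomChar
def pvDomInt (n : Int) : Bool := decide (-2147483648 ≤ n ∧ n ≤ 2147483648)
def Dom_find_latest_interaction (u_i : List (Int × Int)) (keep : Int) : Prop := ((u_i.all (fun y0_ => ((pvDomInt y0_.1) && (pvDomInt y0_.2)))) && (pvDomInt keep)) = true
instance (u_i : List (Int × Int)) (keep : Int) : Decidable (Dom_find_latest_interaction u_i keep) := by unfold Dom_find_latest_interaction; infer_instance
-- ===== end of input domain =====

-- B replaces A's running 'latest' buffer with a two-phase algorithm (group into user runs,
-- then window each run by slicing); same values in the same insertion order (objective: alternative).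

-- ===== PORT A =====
-- init = [-1 for i in range(keep)]
def pvInitA (keep : Int) : List Int := (PySem.List.pyRange 0 keep 1).map (fun _ => (-1 : Int))

-- the enumerate loop of A: state (result, latest); the peek u_i[i+1] is the head of the rest
def pvLoopA (initL : List Int) (keep : Int) :
    PySem.Dict (Int × Int) (List Int) → List Int → List (Int × Int) → PySem.Dict (Int × Int) (List Int)
  | result, _, [] => result
  | result, latest, (user, item) :: rest =>
    let result' := result.insert (user, item) (PySem.List.slice latest (some (-keep)) none)
    let latest' := match rest with
      | [] => latest
      | (u', _) :: _ => if u' ≠ user then initL else latest ++ [item]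
    pvLoopA initL keep result' latest' rest

def find_latest_interaction (u_i : List (Int × Int)) (keep : Int) : List (Int × Int × List Int) :=
  (pvLoopA (pvInitA keep) keep PySem.Dict.empty (pvInitA keep) u_i).items.map
    (fun kv => (kv.1.1, kv.1.2, kv.2))

-- ===== PORT B =====
-- phase 1 of Source B: maximal runs of consecutive equal user
def pvRuns : List (Int × Int) → List (List (Int × Int))
  | [] => []
  | p :: rest =>
    (p :: rest.takeWhile (fun q => q.1 == p.1)) ::
      pvRuns (rest.dropWhile (fun q => q.1 == p.1))
termination_by l => l.length
decreasing_by
  simp only [List.length_cons]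
  exact Nat.lt_succ_of_le (List.length_dropWhile_le _ _)

-- the window for a position j of a run with item list items (prior = items[:j])
def pvWindowB (keep : Int) (items : List Int) (j : Nat) : List Int :=
  let prior := items.take j
  if (prior.length : Int) < keep then List.replicate (keep - prior.length).toNat (-1) ++ prior
  else PySem.List.slice prior (some (-keep)) none

-- phase 2 of Source B: 'for j,(user,item) in enumerate(run)'
def pvRunFoldB (keep : Int) (items : List Int) :
    PySem.Dict (Int × Int) (List Int) → Nat → List (Int × Int) → PySem.Dict (Int × Int) (List Int)
  | d, _, [] => d
  | d, j, (user, item) :: tl =>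
    pvRunFoldB keep items (d.insert (user, item) (pvWindowB keep items j)) (j + 1) tl

def find_latest_interaction_alt (u_i : List (Int × Int)) (keep : Int) : List (Int × Int × List Int) :=
  ((pvRuns u_i).foldl (fun d run => pvRunFoldB keep (run.map Prod.snd) d 0 run)
      PySem.Dict.empty).items.map (fun kv => (kv.1.1, kv.1.2, kv.2))

-- ===== PRECONDITION & SPEC =====
def Spec_find_latest_interaction (u_i : List (Int × Int)) (keep : Int) (out : List (Int × Int × List Int)) : Prop := out = find_latest_interaction_alt u_i keep
instance (u_i : List (Int × Int)) (keep : Int) (out : List (Int × Int × List Int)) : Decidable (Spec_find_latest_interaction u_i keep out) := by unfold Spec_find_latest_interaction; infer_instance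

-- ===== CLAIM (what is proved, stated in full; the proofs are below) =====
def Claim_equal_find_latest_interaction : Prop := ∀ (u_i : List (Int × Int)) (keep : Int), Dom_find_latest_interaction u_i keep → Spec_find_latest_interaction u_i keep (find_latest_interaction u_i keep)

-- ===== LEMMAS AND PROOFS =====

lemma pvInitA_eq (keep : Int) : pvInitA keep = List.replicate keep.toNat (-1) := by
  simp [pvInitA, List.map_const', PySem.List.length_pyRange_one]

-- A's recorded value (init ++ prior)[-keep:] is exactly B's window of prior
lemma pvVal_eq (keep : Int) (prior : List Int) :
    PySem.List.slice (List.replicate keep.toNat (-1) ++ prior) (some (-keep)) none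
      = (if ((prior.length : Int) < keep) then
            List.replicate (keep - prior.length).toNat (-1) ++ prior
         else PySem.List.slice prior (some (-keep)) none) := by
  by_cases hk : keep ≤ 0
  · have h0 : keep.toNat = 0 := Int.toNat_of_nonpos hk
    rw [if_neg (by omega), h0]
    simp
  · obtain ⟨k, hkeq, hkpos⟩ : ∃ k : Nat, keep = (k : Int) ∧ 0 < k :=
      ⟨keep.toNat, (Int.toNat_of_nonneg (by omega)).symm, by omega⟩
    subst hkeq
    rw [PySem.List.slice_from_neg_natCast _ _ hkpos, PySem.List.slice_from_neg_natCast _ _ hkpos]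
    have hlen : (List.replicate (k:Int).toNat (-1:Int) ++ prior).length - k = prior.length := by
      simp
    rw [hlen]
    by_cases hL : prior.length < k
    · rw [if_pos (by omega)]
      rw [List.drop_append_of_le_length (by simp; omega), List.drop_replicate]
      have h3 : ((k:Int) - (prior.length:Int)).toNat = (k:Int).toNat - prior.length := by omega
      rw [h3]
    · rw [if_neg (by omega)]
      have h2 : prior.length = (List.replicate (k:Int).toNat (-1:Int)).length + (prior.length - k) := by
        simp; omega
      rw [h2, List.drop_append]
      simp

lemma pvVal_eq' (keep : Int) (items : List Int) (j : Nat) :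
    PySem.List.slice (pvInitA keep ++ items.take j) (some (-keep)) none
      = pvWindowB keep items j := by
  rw [pvInitA_eq]
  simpa [pvWindowB] using pvVal_eq keep (items.take j)

lemma pvRun_lemma (keep : Int) (u : Int) :
    ∀ (l : List (Int × Int)) (run : List (Int × Int)) (j : Nat) (rest2 : List (Int × Int))
      (d : PySem.Dict (Int × Int) (List Int)),
      run.drop j = l → (∀ q ∈ run, q.1 = u) →
      (match rest2 with | [] => True | q :: _ => q.1 ≠ u) →
      (l = [] → rest2 = []) →
      pvLoopA (pvInitA keep) keep d (pvInitA keep ++ (run.map Prod.snd).take j) (l ++ rest2)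
        = pvLoopA (pvInitA keep) keep (pvRunFoldB keep (run.map Prod.snd) d j l) (pvInitA keep) rest2 := by
  intro l
  induction l with
  | nil =>
    intro run j rest2 d _ _ _ hnil
    rw [hnil rfl]
    simp [pvLoopA, pvRunFoldB]
  | cons x l' ih =>
    intro run j rest2 d hdrop hall hr2 _
    obtain ⟨u', it⟩ := x
    have hx : (u', it) ∈ run := List.drop_subset j run (by rw [hdrop]; exact List.mem_cons_self ..)
    have hu' : u' = u := hall _ hx
    have hitems : (run.map Prod.snd)[j]? = some it := by
      rw [← List.head?_drop, ← List.map_drop, hdrop]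
      rfl
    have htake : (run.map Prod.snd).take (j+1) = (run.map Prod.snd).take j ++ [it] := by
      rw [List.take_add_one, hitems]
      rfl
    have hval : PySem.List.slice (pvInitA keep ++ (run.map Prod.snd).take j) (some (-keep)) none
        = pvWindowB keep (run.map Prod.snd) j := pvVal_eq' ..
    cases l' with
    | cons y l'' =>
      have hy : y ∈ run := List.drop_subset j run (by rw [hdrop]; exact List.mem_cons_of_mem _ (List.mem_cons_self ..))
      have hyu : y.1 = u := hall _ hy
      obtain ⟨yu, yi⟩ := y
      simp only at hyu
      simp only [List.cons_append]
      rw [pvLoopA, pvRunFoldB]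
      rw [if_neg (by simp [hyu, hu'])]
      rw [hval, List.append_assoc, ← htake]
      exact ih run (j+1) rest2 _ (by rw [List.drop_add_one_eq_tail_drop, hdrop]; rfl) hall hr2 (by simp)
    | nil =>
      cases rest2 with
      | nil =>
        simp only [List.append_nil]
        rw [pvLoopA, pvRunFoldB, pvRunFoldB, pvLoopA, pvLoopA, hval]
      | cons q r' =>
        have hq : q.1 ≠ u := hr2
        obtain ⟨qu, qi⟩ := q
        simp only at hq
        simp only [List.nil_append, List.cons_append]
        rw [pvLoopA, pvRunFoldB, pvRunFoldB]
        rw [if_pos (by simp [hu', hq])]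
        rw [hval]

lemma pvMain (keep : Int) :
    ∀ (u_i : List (Int × Int)) (d : PySem.Dict (Int × Int) (List Int)),
      pvLoopA (pvInitA keep) keep d (pvInitA keep) u_i
        = (pvRuns u_i).foldl (fun d run => pvRunFoldB keep (run.map Prod.snd) d 0 run) d := by
  intro u_i
  induction u_i using pvRuns.induct with
  | case1 =>
    intro d
    simp [pvLoopA, pvRuns]
  | case2 p rest ih =>
    intro d
    rw [pvRuns]
    set f : (Int × Int) → Bool := fun q => q.1 == p.1 with hf
    set run : List (Int × Int) := p :: rest.takeWhile f with hrun
    have hsplit : p :: rest = run ++ rest.dropWhile f := by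
      rw [hrun, List.cons_append, List.takeWhile_append_dropWhile]
    have hall : ∀ q ∈ run, q.1 = p.1 := by
      intro q hq
      rcases List.mem_cons.mp hq with h | h
      · rw [h]
      · exact by simpa [hf] using List.mem_takeWhile_imp h
    have hr2 : (match rest.dropWhile f with | [] => True | q :: _ => q.1 ≠ p.1) := by
      cases hdw : rest.dropWhile f with
      | nil => trivial
      | cons q r' =>
        intro hqe
        have hne : rest.dropWhile f ≠ [] := by simp [hdw]
        have hh := List.head_dropWhile_not (l := rest) (p := f) hne
        have hhead : (rest.dropWhile f).head hne = q := by simp [hdw]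
        rw [hhead, hf] at hh
        simp [hqe] at hh
    have hkey := pvRun_lemma keep p.1 run run 0 (rest.dropWhile f) d rfl hall hr2 (by simp [hrun])
    simp only [List.take_zero, List.append_nil] at hkey
    rw [hsplit, hkey, List.foldl_cons, ih]

-- ===== VERDICT (by name: the statement is the Claim_ definition above) =====
theorem find_latest_interaction_spec : Claim_equal_find_latest_interaction := by
  intro u_i keep _
  unfold Spec_find_latest_interaction find_latest_interaction find_latest_interaction_alt
  rw [pvMain]
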